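-- pv_equiv track=rewrite | github.com/GOLAJ-Enterprises/SP-14-Blue-Chess-AI | bitboarder/mask_gens.py | gen_king_mask
-- ===== SOURCE A (Python) =====
-- def gen_king_mask(square: int) -> int:
--     """Generates a bit mask of all valid king moves from a given square.
--
--     The king moves one square in any direction (horizontal, vertical, or diagonal).
--     This function calculates all such legal destinations from the given square,
--     excluding any that would go off the board.
--
--     :param int square: The square to generate the king moves from.
--     :return int: The king move mask.
--     """
--     # Decode square index into (file, rank)
--     file = square % 8
--     rank = square // 8
--     mask = 0
--
--     # Check all 8 adjacent directions
--     for df, dr in [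
--         (-1, -1),
--         (0, -1),
--         (1, -1),
--         (-1, 0),
--         (1, 0),
--         (-1, 1),
--         (0, 1),
--         (1, 1),
--     ]:
--         new_file = file + df
--         new_rank = rank + dr
--
--         # Skip move if it would leave the board
--         if 0 <= new_file < 8 and 0 <= new_rank < 8:
--             target_sq = new_rank * 8 + new_file
--             mask |= 1 << target_sq
--
--     return mask
-- ===== SOURCE B (Python) =====
-- def gen_king_mask(square: int) -> int:
--     """Closed-form king move mask: one 3-bit neighbor row placed on the
--     adjacent ranks, no direction loop or per-direction bounds checks."""
--     file = square % 8
--     rank = square // 8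
--     band = (7 << file >> 1) & 0xFF      # files file-1..file+1, clipped at the board edge
--     sides = band ^ (1 << file)          # same row without the king's own square
--     mask = 0
--     if 0 <= rank - 1 < 8:
--         mask |= band << (8 * (rank - 1))
--     if 0 <= rank < 8:
--         mask |= sides << (8 * rank)
--     if 0 <= rank + 1 < 8:
--         mask |= band << (8 * (rank + 1))
--     return mask
-- ===== Notes on version B (the rewrite author's own statement) =====
-- stated objective: simpler
-- what changed: Replaces the eight-direction loop with per-direction bounds checks by a closed-form three-wide neighbor row (clipped at the board edges by a byte mask) shifted onto the three adjacent ranks.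
import Mathlib
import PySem

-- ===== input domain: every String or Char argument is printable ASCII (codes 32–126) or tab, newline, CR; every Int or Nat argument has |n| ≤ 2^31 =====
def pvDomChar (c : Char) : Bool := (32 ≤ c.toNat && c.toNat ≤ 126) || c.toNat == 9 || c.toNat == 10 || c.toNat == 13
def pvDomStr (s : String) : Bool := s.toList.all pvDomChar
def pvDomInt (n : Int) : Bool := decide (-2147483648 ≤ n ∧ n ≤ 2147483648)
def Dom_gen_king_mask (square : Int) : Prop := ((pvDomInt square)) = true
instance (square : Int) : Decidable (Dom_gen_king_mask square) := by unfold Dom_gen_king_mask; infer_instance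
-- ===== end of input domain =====

-- B replaces A's eight-direction loop with a closed-form three-wide neighbor row placed on the adjacent ranks (simpler; same exact values).

-- ===== PORT A =====
def gen_king_mask (square : Int) : Int :=
  let file := PySem.Int.mod square 8
  let rank := PySem.Int.floordiv square 8
  let mask : Int := 0
  [((-1 : Int), (-1 : Int)), (0, -1), (1, -1), (-1, 0), (1, 0), (-1, 1), (0, 1), (1, 1)].foldl
    (fun mask d =>
      let new_file := file + d.1
      let new_rank := rank + d.2
      if 0 ≤ new_file ∧ new_file < 8 ∧ 0 ≤ new_rank ∧ new_rank < 8 then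
        let target_sq := new_rank * 8 + new_file
        -- under the guard target_sq ≥ 0, so '.toNat' is exact for Python's '1 << target_sq'
        PySem.Int.bor mask (1 <<< target_sq.toNat)
      else mask)
    mask

-- ===== PORT B =====
def gen_king_mask_alt (square : Int) : Int :=
  let file := PySem.Int.mod square 8
  let rank := PySem.Int.floordiv square 8
  -- file = square % 8 ∈ [0,8), so '.toNat' is exact for Python's shifts by file
  let band := PySem.Int.band ((7 <<< file.toNat) >>> 1) 0xFF
  let sides := PySem.Int.bxor band (1 <<< file.toNat)
  let mask : Int := 0
  let mask := if 0 ≤ rank - 1 ∧ rank - 1 < 8 then PySem.Int.bor mask (band <<< (8 * (rank - 1)).toNat) else mask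
  let mask := if 0 ≤ rank ∧ rank < 8 then PySem.Int.bor mask (sides <<< (8 * rank).toNat) else mask
  let mask := if 0 ≤ rank + 1 ∧ rank + 1 < 8 then PySem.Int.bor mask (band <<< (8 * (rank + 1)).toNat) else mask
  mask

-- ===== PRECONDITION & SPEC =====
def Spec_gen_king_mask (square : Int) (out : Int) : Prop := out = gen_king_mask_alt square
instance (square : Int) (out : Int) : Decidable (Spec_gen_king_mask square out) := by unfold Spec_gen_king_mask; infer_instance

-- ===== CLAIM (what is proved, stated in full; the proofs are below) =====
def Claim_equal_gen_king_mask : Prop := ∀ (square : Int), Dom_gen_king_mask square → Spec_gen_king_mask square (gen_king_mask square)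

-- ===== LEMMAS AND PROOFS =====

-- Both ports depend on square only through f = square % 8 ∈ [0,8) and r = square // 8.
lemma king_core_eq (f r : Int) (hf0 : 0 ≤ f) (hf8 : f < 8) :
    ([((-1 : Int), (-1 : Int)), (0, -1), (1, -1), (-1, 0), (1, 0), (-1, 1), (0, 1), (1, 1)].foldl
      (fun mask d =>
        let new_file := f + d.1
        let new_rank := r + d.2
        if 0 ≤ new_file ∧ new_file < 8 ∧ 0 ≤ new_rank ∧ new_rank < 8 then
          PySem.Int.bor mask (1 <<< (new_rank * 8 + new_file).toNat)
        else mask) (0 : Int))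
    =
    (let band := PySem.Int.band ((7 <<< f.toNat) >>> 1) 0xFF
     let sides := PySem.Int.bxor band (1 <<< f.toNat)
     let mask : Int := 0
     let mask := if 0 ≤ r - 1 ∧ r - 1 < 8 then PySem.Int.bor mask (band <<< (8 * (r - 1)).toNat) else mask
     let mask := if 0 ≤ r ∧ r < 8 then PySem.Int.bor mask (sides <<< (8 * r).toNat) else mask
     let mask := if 0 ≤ r + 1 ∧ r + 1 < 8 then PySem.Int.bor mask (band <<< (8 * (r + 1)).toNat) else mask
     mask) := by
  by_cases hr : -1 ≤ r ∧ r ≤ 8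
  · obtain ⟨hr1, hr2⟩ := hr
    interval_cases f <;> interval_cases r <;> decide
  · -- rank far off the board: every guard on both sides is false, both are 0
    trans (0 : Int)
    · simp only [List.foldl_cons, List.foldl_nil]
      rw [if_neg (by omega), if_neg (by omega), if_neg (by omega), if_neg (by omega),
          if_neg (by omega), if_neg (by omega), if_neg (by omega), if_neg (by omega)]
    · simp only []
      rw [if_neg (by omega), if_neg (by omega), if_neg (by omega)]

theorem king_eq (square : Int) : gen_king_mask square = gen_king_mask_alt square := by
  unfold gen_king_mask gen_king_mask_alt
  exact king_core_eq (PySem.Int.mod square 8) (PySem.Int.floordiv square 8)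
    (PySem.Int.mod_nonneg square (by norm_num)) (PySem.Int.mod_lt square (by norm_num))

-- ===== VERDICT (by name: the statement is the Claim_ definition above) =====
theorem gen_king_mask_spec : Claim_equal_gen_king_mask := by
  intro square _
  unfold Spec_gen_king_mask
  exact king_eq square
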